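-- pv_equiv track=rewrite | github.com/adrgs/AoC2022 | Day8-1/solve.py | visible
-- ===== SOURCE A (Python) =====
-- def visible(grid, i, j):
--     m, n = len(grid), len(grid[0])
--     if i == 0 or j == 0 or i == m-1 or j == n-1:
--         return True
--
--     invis = 0
--
--     ip = i
--     while ip > 0:
--         ip -= 1
--         if grid[ip][j] >= grid[i][j]:
--             invis += 1
--             break
--     ip = i
--     while ip < m-1:
--         ip += 1
--         if grid[ip][j] >= grid[i][j]:
--             invis += 1
--             break
--
--     ij = j
--     while ij > 0:
--         ij -= 1
--         if grid[i][ij] >= grid[i][j]: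
--             invis += 1
--             break
--
--     ij = j
--     while ij < n-1:
--         ij += 1
--         if grid[i][ij] >= grid[i][j]:
--             invis += 1
--             break
--
--     if invis == 4:
--         return False
--     return True
-- ===== SOURCE B (Python) =====
-- def visible(grid, i, j):
--     m, n = len(grid), len(grid[0])
--     if i == 0 or j == 0 or i == m - 1 or j == n - 1:
--         return True
--     h = grid[i][j]
--     col = [row[j] for row in grid]
--     for side in (col[:i], col[i + 1:], grid[i][:j], grid[i][j + 1:]):
--         if max(side) < h:
--             return True
--     return False
-- ===== Notes on version B (the rewrite author's own statement) =====
-- stated objective: simpler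
-- what changed: Keeps the natural edge early-return but replaces A's four index-stepping while loops with break and the invis==4 counter by slicing the precomputed column and the row into the four directional sides and returning whether some side has max below the tree height.
-- outside the precondition, e.g. on visible([[9, 9, 9], [1, 1, 1], [9, 9, 9]], -2, 1): A returns True, B returns False; on visible([], 0, 0): A raises IndexError, B raises IndexError
import Mathlib
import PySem

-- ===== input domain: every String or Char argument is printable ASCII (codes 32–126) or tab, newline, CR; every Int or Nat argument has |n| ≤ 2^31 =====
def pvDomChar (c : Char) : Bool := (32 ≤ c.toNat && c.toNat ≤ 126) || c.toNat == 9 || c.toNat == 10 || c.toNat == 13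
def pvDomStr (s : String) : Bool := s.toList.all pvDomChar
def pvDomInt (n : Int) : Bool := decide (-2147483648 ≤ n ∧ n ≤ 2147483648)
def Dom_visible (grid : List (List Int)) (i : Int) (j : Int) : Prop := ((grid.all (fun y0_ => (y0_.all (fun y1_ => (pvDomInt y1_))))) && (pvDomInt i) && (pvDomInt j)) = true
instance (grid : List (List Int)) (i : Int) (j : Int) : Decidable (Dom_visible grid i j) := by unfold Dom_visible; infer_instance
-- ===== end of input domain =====

-- B replaces A's four index-stepping while loops and invis counter by slicing the four
-- directional sides and testing each side's max against the tree height (objective: simpler).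

-- ===== PORT A =====
-- grid[a][b] (total helper; Pre_ keeps all accesses in range, where it agrees with Python)
def pvCell (grid : List (List Int)) (a b : Int) : Int :=
  PySem.List.pyGetD ((PySem.List.pyGet? grid a).getD []) b 0

-- 'while ip > 0: ip -= 1; if grid[ip][j] >= h: invis += 1; break' — fuel = ip
def visUp (grid : List (List Int)) (j h : Int) : Nat → Bool
  | 0 => false
  | k + 1 => if h ≤ pvCell grid (k : Int) j then true else visUp grid j h k

-- 'while ip < m-1: ip += 1; if grid[ip][j] >= h: invis += 1; break' — fuel = m-1-ip
def visDown (grid : List (List Int)) (j h : Int) (ip : Int) : Nat → Bool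
  | 0 => false
  | k + 1 => if h ≤ pvCell grid (ip + 1) j then true else visDown grid j h (ip + 1) k

-- 'while ij > 0: ij -= 1; if grid[i][ij] >= h: invis += 1; break'
def visLeft (grid : List (List Int)) (i h : Int) : Nat → Bool
  | 0 => false
  | k + 1 => if h ≤ pvCell grid i (k : Int) then true else visLeft grid i h k

-- 'while ij < n-1: ij += 1; if grid[i][ij] >= h: invis += 1; break'
def visRight (grid : List (List Int)) (i h : Int) (ij : Int) : Nat → Bool
  | 0 => false
  | k + 1 => if h ≤ pvCell grid i (ij + 1) then true else visRight grid i h (ij + 1) k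

def visible (grid : List (List Int)) (i : Int) (j : Int) : Bool :=
  let m : Int := grid.length
  let n : Int := (((PySem.List.pyGet? grid 0).getD []).length : Int)
  if i = 0 ∨ j = 0 ∨ i = m - 1 ∨ j = n - 1 then true
  else
    let h := pvCell grid i j
    let invis : Int :=
      (if visUp grid j h i.toNat then 1 else 0)
      + (if visDown grid j h i (m - 1 - i).toNat then 1 else 0)
      + (if visLeft grid i h j.toNat then 1 else 0)
      + (if visRight grid i h j (n - 1 - j).toNat then 1 else 0)
    if invis = 4 then false else true

-- ===== PORT B =====
-- 'max(side) < h' (total helper; Pre_ keeps each side nonempty where Python's max is called)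
def belowMax (h : Int) (s : List Int) : Bool :=
  match PySem.List.max? s (fun y => y) with
  | none => true
  | some mx => decide (mx < h)

def visible_alt (grid : List (List Int)) (i : Int) (j : Int) : Bool :=
  let m : Int := grid.length
  let n : Int := (((PySem.List.pyGet? grid 0).getD []).length : Int)
  if i = 0 ∨ j = 0 ∨ i = m - 1 ∨ j = n - 1 then true
  else
    let row := (PySem.List.pyGet? grid i).getD []
    let h := PySem.List.pyGetD row j 0
    let col := grid.map (fun r => PySem.List.pyGetD r j 0)
    [PySem.List.slice col none (some i), PySem.List.slice col (some (i + 1)) none,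
     PySem.List.slice row none (some j), PySem.List.slice row (some (j + 1)) none].any
      (fun s => belowMax h s)

-- ===== PRECONDITION & SPEC =====
-- Pre_ excludes the empty grid (A raises IndexError) and, for non-edge indices, ragged grids
-- and negative or out-of-range indices, where A raises IndexError or its value comes from
-- Python's negative-index wraparound skipping whole scan loops.
def Pre_visible (grid : List (List Int)) (i : Int) (j : Int) : Prop :=
  0 < grid.length ∧
  ((i = 0 ∨ j = 0 ∨ i = (grid.length : Int) - 1 ∨ j = ((grid.getD 0 []).length : Int) - 1) ∨
   ((∀ row ∈ grid, row.length = (grid.getD 0 []).length) ∧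
    0 ≤ i ∧ i < grid.length ∧ 0 ≤ j ∧ j < (grid.getD 0 []).length))

instance (grid : List (List Int)) (i : Int) (j : Int) : Decidable (Pre_visible grid i j) := by
  unfold Pre_visible; infer_instance

def pvWitness_visible : List (List Int) × Int × Int := ([[1, 2], [3, 4]], 0, 1)

def Spec_visible (grid : List (List Int)) (i : Int) (j : Int) (out : Bool) : Prop := out = visible_alt grid i j
instance (grid : List (List Int)) (i : Int) (j : Int) (out : Bool) : Decidable (Spec_visible grid i j out) := by unfold Spec_visible; infer_instance

-- ===== CLAIM (what is proved, stated in full; the proofs are below) =====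
def Claim_equal_visible : Prop := ∀ (grid : List (List Int)) (i : Int) (j : Int), Dom_visible grid i j → Pre_visible grid i j → Spec_visible grid i j (visible grid i j)

-- ===== LEMMAS AND PROOFS =====

lemma belowMax_iff (h : Int) (s : List Int) : belowMax h s = true ↔ ∀ x ∈ s, x < h := by
  unfold belowMax
  cases hmx : PySem.List.max? s (fun y => y) with
  | none =>
    have hs : s = [] := (PySem.List.max?_eq_none_iff s (fun y => y)).1 hmx
    subst hs; simp
  | some mx =>
    have hmem : mx ∈ s := PySem.List.max?_mem hmx
    have hmax : ∀ y ∈ s, y ≤ mx := PySem.List.max?_isMax hmx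
    simp only [decide_eq_true_eq]
    constructor
    · intro hlt x hx; exact lt_of_le_of_lt (hmax x hx) hlt
    · intro hall; exact hall mx hmem

lemma visUp_iff (grid : List (List Int)) (j h : Int) (k : Nat) :
    visUp grid j h k = true ↔ ∃ t < k, h ≤ pvCell grid (t : Int) j := by
  induction k with
  | zero => simp [visUp]
  | succ k ih =>
    simp only [visUp]
    split_ifs with hc
    · simp only [true_iff]; exact ⟨k, by omega, hc⟩
    · rw [ih]
      constructor
      · rintro ⟨t, ht, hle⟩; exact ⟨t, by omega, hle⟩
      · rintro ⟨t, ht, hle⟩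
        rcases Nat.lt_succ_iff_lt_or_eq.1 ht with h1 | rfl
        · exact ⟨t, h1, hle⟩
        · exact absurd hle hc

lemma visDown_iff (grid : List (List Int)) (j h : Int) (ip : Int) (f : Nat) :
    visDown grid j h ip f = true ↔ ∃ t < f, h ≤ pvCell grid (ip + 1 + (t : Int)) j := by
  induction f generalizing ip with
  | zero => simp [visDown]
  | succ f ih =>
    simp only [visDown]
    split_ifs with hc
    · simp only [true_iff]
      exact ⟨0, by omega, by simpa using hc⟩
    · rw [ih]
      constructor
      · rintro ⟨t, ht, hle⟩
        refine ⟨t + 1, by omega, ?_⟩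
        convert hle using 2; push_cast; ring
      · rintro ⟨t, ht, hle⟩
        cases t with
        | zero => exact absurd (by simpa using hle) hc
        | succ t =>
          refine ⟨t, by omega, ?_⟩
          convert hle using 2; push_cast; ring

lemma visLeft_iff (grid : List (List Int)) (i h : Int) (k : Nat) :
    visLeft grid i h k = true ↔ ∃ t < k, h ≤ pvCell grid i (t : Int) := by
  induction k with
  | zero => simp [visLeft]
  | succ k ih =>
    simp only [visLeft]
    split_ifs with hc
    · simp only [true_iff]; exact ⟨k, by omega, hc⟩
    · rw [ih]
      constructor
      · rintro ⟨t, ht, hle⟩; exact ⟨t, by omega, hle⟩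
      · rintro ⟨t, ht, hle⟩
        rcases Nat.lt_succ_iff_lt_or_eq.1 ht with h1 | rfl
        · exact ⟨t, h1, hle⟩
        · exact absurd hle hc

lemma visRight_iff (grid : List (List Int)) (i h : Int) (ij : Int) (f : Nat) :
    visRight grid i h ij f = true ↔ ∃ t < f, h ≤ pvCell grid i (ij + 1 + (t : Int)) := by
  induction f generalizing ij with
  | zero => simp [visRight]
  | succ f ih =>
    simp only [visRight]
    split_ifs with hc
    · simp only [true_iff]
      exact ⟨0, by omega, by simpa using hc⟩
    · rw [ih]
      constructor
      · rintro ⟨t, ht, hle⟩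
        refine ⟨t + 1, by omega, ?_⟩
        convert hle using 2; push_cast; ring
      · rintro ⟨t, ht, hle⟩
        cases t with
        | zero => exact absurd (by simpa using hle) hc
        | succ t =>
          refine ⟨t, by omega, ?_⟩
          convert hle using 2; push_cast; ring

lemma pvCell_nat (grid : List (List Int)) (j : Int) (t : Nat) (ht : t < grid.length) :
    pvCell grid (t : Int) j = PySem.List.pyGetD grid[t] j 0 := by
  simp [pvCell, PySem.List.pyGet?_natCast, List.getElem?_eq_getElem ht]

-- ===== VERDICT (by name: the statement is the Claim_ definition above) =====
theorem visible_spec : Claim_equal_visible := by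
  intro grid i j _ hpre
  obtain ⟨hm, hrest⟩ := hpre
  have hgetD : grid.getD 0 [] = grid[0]'hm := by
    simp [List.getD, List.getElem?_eq_getElem hm]
  have hg0? : PySem.List.pyGet? grid 0 = some (grid[0]'hm) := by
    rw [PySem.List.pyGet?_zero grid, List.getElem?_eq_getElem hm]
  unfold Spec_visible visible visible_alt
  simp only [hg0?, Option.getD_some]
  by_cases hedge : i = 0 ∨ j = 0 ∨ i = (grid.length : Int) - 1 ∨ j = ((grid[0]'hm).length : Int) - 1
  · rw [if_pos hedge, if_pos hedge]
  rcases hrest with hL | ⟨hrect, hi0, him, hj0, hjn⟩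
  · rw [hgetD] at hL; exact absurd hL hedge
  rw [hgetD] at hrect hjn
  have hiN : i.toNat < grid.length := by omega
  have hg? : PySem.List.pyGet? grid i = some (grid[i.toNat]'hiN) := by
    rw [PySem.List.pyGet?_of_nonneg grid hi0, List.getElem?_eq_getElem hiN]
  simp only [hg?, Option.getD_some]
  rw [if_neg hedge, if_neg hedge]
  have hA : pvCell grid i j = PySem.List.pyGetD (grid[i.toNat]'hiN) j 0 := by
    simp [pvCell, hg?]
  rw [← hA]
  set h := pvCell grid i j with hh
  set col := List.map (fun r => PySem.List.pyGetD r j 0) grid with hcol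
  have hcollen : col.length = grid.length := by simp [hcol]
  have hrlen : (grid[i.toNat]'hiN).length = (grid[0]'hm).length :=
    hrect _ (List.getElem_mem hiN)
  have hcell : ∀ t (ht : t < grid.length),
      pvCell grid (t : Int) j = col[t]'(by rw [hcollen]; exact ht) := by
    intro t ht
    rw [pvCell_nat grid j t ht]
    simp [hcol]
  have hcellrow : ∀ b : Int, pvCell grid i b = PySem.List.pyGetD (grid[i.toNat]'hiN) b 0 := by
    intro b; simp [pvCell, hg?]
  have hrowget : ∀ t (ht : t < (grid[i.toNat]'hiN).length),
      pvCell grid i (t : Int) = (grid[i.toNat]'hiN)[t]'ht := by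
    intro t ht
    rw [hcellrow, PySem.List.pyGetD_natCast]
    simp [List.getD, List.getElem?_eq_getElem ht]
  have hup : belowMax h (PySem.List.slice col none (some i)) = ! visUp grid j h i.toNat := by
      rw [PySem.List.slice_to col hi0]
      cases hv : visUp grid j h i.toNat with
      | true =>
        obtain ⟨t, ht, hle⟩ := (visUp_iff grid j h i.toNat).1 hv
        have htm : t < grid.length := by omega
        rw [hcell t htm] at hle
        simp only [Bool.not_true]
        rw [Bool.eq_false_iff]
        intro hbm
        have hall := (belowMax_iff h _).1 hbm
        have hmemt : col[t]'(by rw [hcollen]; exact htm) ∈ col.take i.toNat := by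
          rw [List.mem_take_iff_getElem]
          exact ⟨t, by omega, rfl⟩
        have := hall _ hmemt
        omega
      | false =>
        simp only [Bool.not_false]
        rw [belowMax_iff]
        intro x hx
        obtain ⟨t, htb, rfl⟩ := List.mem_take_iff_getElem.1 hx
        by_contra hxh
        push Not at hxh
        have htm : t < grid.length := by rw [← hcollen]; omega
        have : visUp grid j h i.toNat = true :=
          (visUp_iff grid j h i.toNat).2 ⟨t, by omega, by rw [hcell t htm]; exact hxh⟩
        rw [this] at hv; cases hv
  have hdown : belowMax h (PySem.List.slice col (some (i + 1)) none)
      = ! visDown grid j h i ((grid.length : Int) - 1 - i).toNat := by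
    rw [PySem.List.slice_from col (by omega : (0:Int) ≤ i + 1)]
    have hd1 : (i + 1).toNat = i.toNat + 1 := by omega
    rw [hd1]
    cases hv : visDown grid j h i ((grid.length : Int) - 1 - i).toNat with
    | true =>
      obtain ⟨t, ht, hle⟩ := (visDown_iff grid j h i _).1 hv
      have htm : i.toNat + 1 + t < grid.length := by omega
      have hcast : i + 1 + (t : Int) = ((i.toNat + 1 + t : Nat) : Int) := by push_cast; omega
      rw [hcast, hcell _ htm] at hle
      simp only [Bool.not_true]
      rw [Bool.eq_false_iff]
      intro hbm
      have hall := (belowMax_iff h _).1 hbm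
      have hmemt : col[i.toNat + 1 + t]'(by rw [hcollen]; exact htm) ∈ col.drop (i.toNat + 1) := by
        rw [List.mem_drop_iff_getElem]
        exact ⟨t, by omega, rfl⟩
      have := hall _ hmemt
      omega
    | false =>
      simp only [Bool.not_false]
      rw [belowMax_iff]
      intro x hx
      obtain ⟨t, htb, rfl⟩ := List.mem_drop_iff_getElem.1 hx
      by_contra hxh
      push Not at hxh
      have htm : i.toNat + 1 + t < grid.length := by rw [← hcollen]; omega
      have : visDown grid j h i ((grid.length : Int) - 1 - i).toNat = true := by
        refine (visDown_iff grid j h i _).2 ⟨t, by omega, ?_⟩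
        rw [show i + 1 + (t : Int) = ((i.toNat + 1 + t : Nat) : Int) by push_cast; omega,
          hcell _ htm]
        exact hxh
      rw [this] at hv; cases hv
  have hleft : belowMax h (PySem.List.slice (grid[i.toNat]'hiN) none (some j))
      = ! visLeft grid i h j.toNat := by
    rw [PySem.List.slice_to _ hj0]
    cases hv : visLeft grid i h j.toNat with
    | true =>
      obtain ⟨t, ht, hle⟩ := (visLeft_iff grid i h j.toNat).1 hv
      have htm : t < (grid[i.toNat]'hiN).length := by omega
      rw [hrowget t htm] at hle
      simp only [Bool.not_true]
      rw [Bool.eq_false_iff]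
      intro hbm
      have hall := (belowMax_iff h _).1 hbm
      have hmemt : (grid[i.toNat]'hiN)[t]'htm ∈ (grid[i.toNat]'hiN).take j.toNat := by
        rw [List.mem_take_iff_getElem]
        exact ⟨t, by omega, rfl⟩
      have := hall _ hmemt
      omega
    | false =>
      simp only [Bool.not_false]
      rw [belowMax_iff]
      intro x hx
      obtain ⟨t, htb, rfl⟩ := List.mem_take_iff_getElem.1 hx
      by_contra hxh
      push Not at hxh
      have htm : t < (grid[i.toNat]'hiN).length := by omega
      have : visLeft grid i h j.toNat = true :=
        (visLeft_iff grid i h j.toNat).2 ⟨t, by omega, by rw [hrowget t htm]; exact hxh⟩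
      rw [this] at hv; cases hv
  have hright : belowMax h (PySem.List.slice (grid[i.toNat]'hiN) (some (j + 1)) none)
      = ! visRight grid i h j (((grid[0]'hm).length : Int) - 1 - j).toNat := by
    rw [PySem.List.slice_from _ (by omega : (0:Int) ≤ j + 1)]
    have hd1 : (j + 1).toNat = j.toNat + 1 := by omega
    rw [hd1]
    cases hv : visRight grid i h j (((grid[0]'hm).length : Int) - 1 - j).toNat with
    | true =>
      obtain ⟨t, ht, hle⟩ := (visRight_iff grid i h j _).1 hv
      have htm : j.toNat + 1 + t < (grid[i.toNat]'hiN).length := by omega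
      have hcast : j + 1 + (t : Int) = ((j.toNat + 1 + t : Nat) : Int) := by push_cast; omega
      rw [hcast, hrowget _ htm] at hle
      simp only [Bool.not_true]
      rw [Bool.eq_false_iff]
      intro hbm
      have hall := (belowMax_iff h _).1 hbm
      have hmemt : (grid[i.toNat]'hiN)[j.toNat + 1 + t]'htm
          ∈ (grid[i.toNat]'hiN).drop (j.toNat + 1) := by
        rw [List.mem_drop_iff_getElem]
        exact ⟨t, by omega, rfl⟩
      have := hall _ hmemt
      omega
    | false =>
      simp only [Bool.not_false]
      rw [belowMax_iff]
      intro x hx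
      obtain ⟨t, htb, rfl⟩ := List.mem_drop_iff_getElem.1 hx
      by_contra hxh
      push Not at hxh
      have htm : j.toNat + 1 + t < (grid[i.toNat]'hiN).length := by omega
      have : visRight grid i h j (((grid[0]'hm).length : Int) - 1 - j).toNat = true := by
        refine (visRight_iff grid i h j _).2 ⟨t, by omega, ?_⟩
        rw [show j + 1 + (t : Int) = ((j.toNat + 1 + t : Nat) : Int) by push_cast; omega,
          hrowget _ htm]
        exact hxh
      rw [this] at hv; cases hv
  simp only [List.any_cons, List.any_nil, Bool.or_false]
  rw [hup, hdown, hleft, hright]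
  set b1 := visUp grid j h i.toNat with hb1
  set b2 := visDown grid j h i ((grid.length : Int) - 1 - i).toNat with hb2
  set b3 := visLeft grid i h j.toNat with hb3
  set b4 := visRight grid i h j (((grid[0]'hm).length : Int) - 1 - j).toNat with hb4
  clear_value b1 b2 b3 b4
  cases b1 <;> cases b2 <;> cases b3 <;> cases b4 <;> norm_num
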